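-- pv_equiv track=rewrite | github.com/Chrisa142857/You-Only-Look-Cytopathology-Once | det-patch-level/utils/datasets.py | sliding_sample_pt
-- ===== SOURCE A (Python) =====
-- def sliding_sample_pt(img_size, overlap, center_box):
--     xmin, ymin, xmax, ymax = center_box
--     xmin, ymin, xmax, ymax = int(xmin), int(ymin), int(xmax), int(ymax)
--     xs = [x for x in range(xmin, xmax, img_size[0]-overlap)]
--     ys = [y for y in range(ymin, ymax, img_size[1]-overlap)]
--     X, Y = [], []
--     for iy in ys:
--         for i in range(len(xs)):
--             Y += [iy]
--     for i in range(len(ys)):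
--         X += xs
--     pts = [[x, y] for x, y in zip(X, Y)]
--     return pts
-- ===== SOURCE B (Python) =====
-- def sliding_sample_pt(img_size, overlap, center_box):
--     xmin, ymin, xmax, ymax = center_box
--     xs = range(int(xmin), int(xmax), img_size[0] - overlap)
--     ys = range(int(ymin), int(ymax), img_size[1] - overlap)
--     return [[x, y] for y in ys for x in xs]
-- ===== Notes on version B (the rewrite author's own statement) =====
-- stated objective: simpler
-- what changed: B emits the grid points directly with one nested comprehension over the Cartesian product (y outer, x inner), dropping A's two separately-built full-length parallel arrays X and Y and the zip pass.
import Mathlib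
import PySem

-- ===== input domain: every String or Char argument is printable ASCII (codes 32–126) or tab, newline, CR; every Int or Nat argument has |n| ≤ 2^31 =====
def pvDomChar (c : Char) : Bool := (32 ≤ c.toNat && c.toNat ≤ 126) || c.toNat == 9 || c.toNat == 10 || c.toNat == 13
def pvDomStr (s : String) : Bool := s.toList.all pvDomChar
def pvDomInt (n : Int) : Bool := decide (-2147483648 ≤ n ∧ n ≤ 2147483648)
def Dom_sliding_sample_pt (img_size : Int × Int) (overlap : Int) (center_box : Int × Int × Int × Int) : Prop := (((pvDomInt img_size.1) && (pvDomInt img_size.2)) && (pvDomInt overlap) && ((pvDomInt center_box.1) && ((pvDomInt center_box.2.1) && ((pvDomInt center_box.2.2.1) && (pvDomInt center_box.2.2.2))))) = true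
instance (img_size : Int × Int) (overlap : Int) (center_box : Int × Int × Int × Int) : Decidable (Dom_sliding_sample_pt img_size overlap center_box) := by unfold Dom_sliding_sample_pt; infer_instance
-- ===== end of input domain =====

-- B replaces A's two separately-built parallel arrays X, Y and the final zip by a single
-- nested traversal of the Cartesian product (y outer, x inner); return value only, simpler.

-- ===== PORT A =====
def sliding_sample_pt (img_size : Int × Int) (overlap : Int) (center_box : Int × Int × Int × Int) : List (List Int) :=
  let xmin := center_box.1
  let ymin := center_box.2.1
  let xmax := center_box.2.2.1
  let ymax := center_box.2.2.2
  let xs := PySem.List.pyRange xmin xmax (img_size.1 - overlap)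
  let ys := PySem.List.pyRange ymin ymax (img_size.2 - overlap)
  -- for iy in ys: for i in range(len(xs)): Y += [iy]
  let Y := ys.foldl (fun Y iy => (PySem.List.pyRange 0 (xs.length : Int) 1).foldl (fun Y _ => Y ++ [iy]) Y) []
  -- for i in range(len(ys)): X += xs
  let X := (PySem.List.pyRange 0 (ys.length : Int) 1).foldl (fun X _ => X ++ xs) []
  (X.zip Y).map (fun p => [p.1, p.2])

-- ===== PORT B =====
def sliding_sample_pt_alt (img_size : Int × Int) (overlap : Int) (center_box : Int × Int × Int × Int) : List (List Int) :=
  let xs := PySem.List.pyRange center_box.1 center_box.2.2.1 (img_size.1 - overlap)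
  let ys := PySem.List.pyRange center_box.2.1 center_box.2.2.2 (img_size.2 - overlap)
  ys.flatMap (fun y => xs.map (fun x => [x, y]))

-- ===== PRECONDITION & SPEC =====
-- Pre_ excludes exactly the inputs where range(..., step) gets step 0 and Python A raises ValueError.
def Pre_sliding_sample_pt (img_size : Int × Int) (overlap : Int) (center_box : Int × Int × Int × Int) : Prop :=
  img_size.1 - overlap ≠ 0 ∧ img_size.2 - overlap ≠ 0
instance (img_size : Int × Int) (overlap : Int) (center_box : Int × Int × Int × Int) : Decidable (Pre_sliding_sample_pt img_size overlap center_box) := by unfold Pre_sliding_sample_pt; infer_instance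
def pvWitness_sliding_sample_pt : (Int × Int) × Int × (Int × Int × Int × Int) := ((3, 3), 1, (0, 0, 5, 5))

def Spec_sliding_sample_pt (img_size : Int × Int) (overlap : Int) (center_box : Int × Int × Int × Int) (out : List (List Int)) : Prop := out = sliding_sample_pt_alt img_size overlap center_box
instance (img_size : Int × Int) (overlap : Int) (center_box : Int × Int × Int × Int) (out : List (List Int)) : Decidable (Spec_sliding_sample_pt img_size overlap center_box out) := by unfold Spec_sliding_sample_pt; infer_instance

-- ===== CLAIM (what is proved, stated in full; the proofs are below) =====
def Claim_equal_sliding_sample_pt : Prop := ∀ (img_size : Int × Int) (overlap : Int) (center_box : Int × Int × Int × Int), Dom_sliding_sample_pt img_size overlap center_box → Pre_sliding_sample_pt img_size overlap center_box → Spec_sliding_sample_pt img_size overlap center_box (sliding_sample_pt img_size overlap center_box)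

-- ===== LEMMAS AND PROOFS =====

-- inner loop 'for i in range(n): Y += [v]' appends n copies of v
theorem pv_foldl_snoc {α : Type} (l : List α) (init : List Int) (v : Int) :
    l.foldl (fun acc _ => acc ++ [v]) init = init ++ List.replicate l.length v := by
  induction l generalizing init with
  | nil => simp
  | cons a t ih => simp [List.foldl_cons, ih, List.replicate_succ]

-- 'for i in range(n): X += xs' appends n copies of xs
theorem pv_foldl_append {α : Type} (l : List α) (init xs : List Int) :
    l.foldl (fun acc _ => acc ++ xs) init = init ++ (List.replicate l.length xs).flatten := by
  induction l generalizing init with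
  | nil => simp
  | cons a t ih => simp [List.foldl_cons, ih, List.replicate_succ]

-- Y loop over ys
theorem pv_Y_loop (ys : List Int) (n : Nat) (init : List Int) :
    ys.foldl (fun acc iy => acc ++ List.replicate n iy) init = init ++ ys.flatMap (List.replicate n) := by
  induction ys generalizing init with
  | nil => simp
  | cons y t ih => simp [List.foldl_cons, ih]

theorem pv_zip_replicate (xs : List Int) (y : Int) :
    ((xs.zip (List.replicate xs.length y)).map (fun p => [p.1, p.2])) = xs.map (fun x => [x, y]) := by
  induction xs with
  | nil => simp
  | cons x t ih => simp [List.replicate_succ, ih]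

theorem pv_main (ys xs : List Int) :
    (((List.replicate ys.length xs).flatten).zip (ys.flatMap (List.replicate xs.length))).map (fun p => [p.1, p.2])
      = ys.flatMap (fun y => xs.map (fun x => [x, y])) := by
  induction ys with
  | nil => simp
  | cons y t ih =>
    have hlen : xs.length = (List.replicate xs.length y).length := by simp
    simp only [List.length_cons, List.replicate_succ, List.flatten_cons, List.flatMap_cons,
      List.zip_append hlen, List.map_append, ih, pv_zip_replicate]

-- ===== VERDICT (by name: the statement is the Claim_ definition above) =====
theorem sliding_sample_pt_spec : Claim_equal_sliding_sample_pt := by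
  intro img_size overlap center_box _ _
  unfold Spec_sliding_sample_pt sliding_sample_pt sliding_sample_pt_alt
  simp only []
  set xs := PySem.List.pyRange center_box.1 center_box.2.2.1 (img_size.1 - overlap) with hxs
  set ys := PySem.List.pyRange center_box.2.1 center_box.2.2.2 (img_size.2 - overlap) with hys
  have hr1 : (PySem.List.pyRange 0 (xs.length : Int) 1).length = xs.length := by
    simp [PySem.List.length_pyRange_one]
  have hr2 : (PySem.List.pyRange 0 (ys.length : Int) 1).length = ys.length := by
    simp [PySem.List.length_pyRange_one]
  have hY : ys.foldl (fun Y iy => (PySem.List.pyRange 0 (xs.length : Int) 1).foldl (fun Y _ => Y ++ [iy]) Y) []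
      = ys.flatMap (List.replicate xs.length) := by
    have : (fun (Y : List Int) (iy : Int) => (PySem.List.pyRange 0 (xs.length : Int) 1).foldl (fun Y _ => Y ++ [iy]) Y)
        = fun Y iy => Y ++ List.replicate xs.length iy := by
      funext Y iy; rw [pv_foldl_snoc, hr1]
    rw [this, pv_Y_loop]; simp
  have hX : (PySem.List.pyRange 0 (ys.length : Int) 1).foldl (fun X _ => X ++ xs) []
      = (List.replicate ys.length xs).flatten := by
    rw [pv_foldl_append, hr2]; simp
  rw [hY, hX, pv_main]
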